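-- pv_equiv track=rewrite | github.com/jogrady23/pychef | pychef_helper.py | generate_dict_by_type
-- ===== SOURCE A (Python) =====
-- def generate_dict_by_type(recipes_dict):
--     breakfast_dict = {}
--     lunch_dict = {}
--     dinner_dict = {}
--
--     for meal in recipes_dict['meals'].keys():
--         meal_satisfies_list = recipes_dict['meals'][meal]['satisfies']
--         if 'breakfast' in meal_satisfies_list:
--             breakfast_dict[meal] = recipes_dict['meals'][meal]
--         if 'lunch' in meal_satisfies_list:
--             lunch_dict[meal] = recipes_dict['meals'][meal]
--         if 'dinner' in meal_satisfies_list: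
--             dinner_dict[meal] = recipes_dict['meals'][meal]
--
--     return {'breakfast': breakfast_dict,
--             'lunch': lunch_dict,
--             'dinner': dinner_dict}
-- ===== SOURCE B (Python) =====
-- def generate_dict_by_type(recipes_dict):
--     meals = recipes_dict['meals']
--     return {cat: {meal: info for meal, info in meals.items()
--                   if cat in info['satisfies']}
--             for cat in ('breakfast', 'lunch', 'dinner')}
-- ===== Notes on version B (the rewrite author's own statement) =====
-- stated objective: idiomatic
-- what changed: Replaces the single pass maintaining three accumulator dicts with a nested dict comprehension: one filtered pass over meals.items() per category.
import Mathlib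
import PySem

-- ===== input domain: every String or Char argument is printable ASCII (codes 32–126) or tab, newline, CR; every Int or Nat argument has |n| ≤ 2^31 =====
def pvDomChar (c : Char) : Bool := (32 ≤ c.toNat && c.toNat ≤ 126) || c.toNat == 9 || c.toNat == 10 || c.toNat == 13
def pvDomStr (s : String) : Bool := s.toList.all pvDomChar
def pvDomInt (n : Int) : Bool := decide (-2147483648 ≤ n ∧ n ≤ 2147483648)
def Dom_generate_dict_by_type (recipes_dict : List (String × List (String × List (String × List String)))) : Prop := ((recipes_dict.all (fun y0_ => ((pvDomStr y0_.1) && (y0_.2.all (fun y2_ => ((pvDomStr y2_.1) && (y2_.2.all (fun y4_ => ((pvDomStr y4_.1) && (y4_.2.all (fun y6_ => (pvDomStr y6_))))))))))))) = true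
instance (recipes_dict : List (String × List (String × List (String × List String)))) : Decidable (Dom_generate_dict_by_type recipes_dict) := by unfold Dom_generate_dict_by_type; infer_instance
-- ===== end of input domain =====

-- B replaces A's single pass with three accumulator dicts by one filtered pass per category (idiomatic nested dict comprehension); return values are proved equal.

-- ===== PORT A =====
-- A: one loop over the meal keys, distributing each meal into three accumulator dicts.
def generate_dict_by_type (recipes_dict : List (String × List (String × List (String × List String)))) : List (String × List (String × List (String × List String))) :=
  -- recipes_dict['meals']  (KeyError when absent: excluded by Pre_)
  let meals := (PySem.Dict.mk recipes_dict).getD "meals" []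
  let mealsD := PySem.Dict.mk meals
  let s := mealsD.keys.foldl
    (fun (s : PySem.Dict String (List (String × List String)) ×
              PySem.Dict String (List (String × List String)) ×
              PySem.Dict String (List (String × List String))) meal =>
      let info := mealsD.getD meal []
      -- recipes_dict['meals'][meal]['satisfies']  (KeyError when absent: excluded by Pre_)
      let sat := (PySem.Dict.mk info).getD "satisfies" []
      (if sat.contains "breakfast" then s.1.insert meal info else s.1,
       if sat.contains "lunch" then s.2.1.insert meal info else s.2.1,
       if sat.contains "dinner" then s.2.2.insert meal info else s.2.2))
    (PySem.Dict.empty, PySem.Dict.empty, PySem.Dict.empty)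
  [("breakfast", s.1.items), ("lunch", s.2.1.items), ("dinner", s.2.2.items)]

-- ===== PORT B =====
-- B: per-category dict comprehension; a comprehension over the unique-keyed meals.items()
-- inserts fresh keys in order, i.e. is the filter of the items list.
def generate_dict_by_type_alt (recipes_dict : List (String × List (String × List (String × List String)))) : List (String × List (String × List (String × List String))) :=
  let meals := (PySem.Dict.mk recipes_dict).getD "meals" []
  [("breakfast" : String), "lunch", "dinner"].map (fun cat =>
    (cat, (PySem.Dict.mk meals).items.filter
            (fun p => ((PySem.Dict.mk p.2).getD "satisfies" []).contains cat)))

-- ===== PRECONDITION & SPEC =====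
-- Pre_ excludes exactly: (a) inputs where Python A raises KeyError ('meals' missing, or some meal
-- without a 'satisfies' key), and (b) association lists whose meal keys are not distinct — those
-- are unrepresentable as a Python dict, so A is never run on them.
def Pre_generate_dict_by_type (recipes_dict : List (String × List (String × List (String × List String)))) : Prop :=
  (PySem.Dict.mk recipes_dict).contains "meals" = true ∧
  (((PySem.Dict.mk recipes_dict).getD "meals" []).map (·.1)).Nodup ∧
  ∀ p ∈ (PySem.Dict.mk recipes_dict).getD "meals" [],
    (PySem.Dict.mk p.2).contains "satisfies" = true
instance (recipes_dict : List (String × List (String × List (String × List String)))) : Decidable (Pre_generate_dict_by_type recipes_dict) := by unfold Pre_generate_dict_by_type; infer_instance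

def pvWitness_generate_dict_by_type : (List (String × List (String × List (String × List String)))) :=
  [("meals", [("eggs", [("satisfies", ["breakfast", "dinner"])]),
              ("soup", [("satisfies", ["lunch"])])])]

def Spec_generate_dict_by_type (recipes_dict : List (String × List (String × List (String × List String)))) (out : List (String × List (String × List (String × List String)))) : Prop := out = generate_dict_by_type_alt recipes_dict
instance (recipes_dict : List (String × List (String × List (String × List String)))) (out : List (String × List (String × List (String × List String)))) : Decidable (Spec_generate_dict_by_type recipes_dict out) := by unfold Spec_generate_dict_by_type; infer_instance

-- ===== CLAIM (what is proved, stated in full; the proofs are below) =====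
def Claim_equal_generate_dict_by_type : Prop := ∀ (recipes_dict : List (String × List (String × List (String × List String)))), Dom_generate_dict_by_type recipes_dict → Pre_generate_dict_by_type recipes_dict → Spec_generate_dict_by_type recipes_dict (generate_dict_by_type recipes_dict)

-- ===== LEMMAS AND PROOFS =====

-- A's distributing fold, restricted to one category, produces exactly B's filter of the meals list.
lemma dict_fold_filter
    (meals : List (String × List (String × List String)))
    (P : (String × List (String × List String)) → Bool)
    (hnd : (meals.map (·.1)).Nodup) :
    (meals.foldl (fun (d : PySem.Dict String (List (String × List String))) p =>
        if P p then d.insert p.1 p.2 else d) PySem.Dict.empty).items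
      = meals.filter P := by
  rw [PySem.List.foldl_if_eq_foldl_filter]
  have h1 : ∀ p ∈ meals.filter P,
      (PySem.Dict.empty : PySem.Dict String (List (String × List String))).contains p.1 = false :=
    fun p _ => PySem.Dict.contains_empty _
  have h2 : ((meals.filter P).map (fun p => p.1)).Nodup :=
    List.Nodup.sublist (List.Sublist.map _ List.filter_sublist) hnd
  rw [PySem.Dict.items_foldl_insert_fresh (meals.filter P) (fun p => p.1) (fun p => p.2)
      PySem.Dict.empty h1 h2]
  simp [PySem.Dict.empty]

-- ===== VERDICT (by name: the statement is the Claim_ definition above) =====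
theorem generate_dict_by_type_spec : Claim_equal_generate_dict_by_type := by
  intro rd _ hpre
  obtain ⟨-, hnd, -⟩ := hpre
  simp only [Spec_generate_dict_by_type, generate_dict_by_type, generate_dict_by_type_alt,
    List.map_cons, List.map_nil]
  set meals := (PySem.Dict.mk rd).getD "meals" [] with hm
  have hknd : (PySem.Dict.mk meals).keys.Nodup := hnd
  have hkeys : (PySem.Dict.mk meals).keys = meals.map (·.1) := rfl
  rw [hkeys, List.foldl_map]
  have hc := PySem.List.foldl_congr_mem meals
    (fun (s : PySem.Dict String (List (String × List String)) ×
              PySem.Dict String (List (String × List String)) ×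
              PySem.Dict String (List (String × List String))) (p : String × List (String × List String)) =>
      (if ((PySem.Dict.mk ((PySem.Dict.mk meals).getD p.1 [])).getD "satisfies" []).contains "breakfast" then s.1.insert p.1 ((PySem.Dict.mk meals).getD p.1 []) else s.1,
       if ((PySem.Dict.mk ((PySem.Dict.mk meals).getD p.1 [])).getD "satisfies" []).contains "lunch" then s.2.1.insert p.1 ((PySem.Dict.mk meals).getD p.1 []) else s.2.1,
       if ((PySem.Dict.mk ((PySem.Dict.mk meals).getD p.1 [])).getD "satisfies" []).contains "dinner" then s.2.2.insert p.1 ((PySem.Dict.mk meals).getD p.1 []) else s.2.2))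
    (fun (s : PySem.Dict String (List (String × List String)) ×
              PySem.Dict String (List (String × List String)) ×
              PySem.Dict String (List (String × List String))) (p : String × List (String × List String)) =>
      (if ((PySem.Dict.mk p.2).getD "satisfies" []).contains "breakfast" then s.1.insert p.1 p.2 else s.1,
       if ((PySem.Dict.mk p.2).getD "satisfies" []).contains "lunch" then s.2.1.insert p.1 p.2 else s.2.1,
       if ((PySem.Dict.mk p.2).getD "satisfies" []).contains "dinner" then s.2.2.insert p.1 p.2 else s.2.2))
    (PySem.Dict.empty, PySem.Dict.empty, PySem.Dict.empty)
    (by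
      intro acc p hp
      have hp' : (p.1, p.2) ∈ (PySem.Dict.mk meals).items := by simpa using hp
      have hg : (PySem.Dict.mk meals).getD p.1 [] = p.2 :=
        PySem.Dict.getD_of_mem_items _ hp' hknd []
      simp only [hg])
  rw [hc]
  rw [PySem.List.foldl_prod_mk
      (f := fun (d : PySem.Dict String (List (String × List String))) (p : String × List (String × List String)) =>
        if ((PySem.Dict.mk p.2).getD "satisfies" []).contains "breakfast" then d.insert p.1 p.2 else d)
      (g := fun (s : PySem.Dict String (List (String × List String)) ×
                 PySem.Dict String (List (String × List String))) (p : String × List (String × List String)) =>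
       (if ((PySem.Dict.mk p.2).getD "satisfies" []).contains "lunch" then s.1.insert p.1 p.2 else s.1,
        if ((PySem.Dict.mk p.2).getD "satisfies" []).contains "dinner" then s.2.insert p.1 p.2 else s.2))]
  rw [PySem.List.foldl_prod_mk
      (f := fun (d : PySem.Dict String (List (String × List String))) (p : String × List (String × List String)) =>
        if ((PySem.Dict.mk p.2).getD "satisfies" []).contains "lunch" then d.insert p.1 p.2 else d)
      (g := fun (d : PySem.Dict String (List (String × List String))) (p : String × List (String × List String)) =>
        if ((PySem.Dict.mk p.2).getD "satisfies" []).contains "dinner" then d.insert p.1 p.2 else d)]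
  rw [dict_fold_filter _ _ hnd, dict_fold_filter _ _ hnd, dict_fold_filter _ _ hnd]
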